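-- pv_equiv track=rewrite | github.com/TheRoD2k/PythonContests_DIHT | CONTEST_5/D/source.py | check_register
-- ===== SOURCE A (Python) =====
-- def check_register(line):
--     lowercase_exists = False
--     uppercase_exists = False
--     for i in line:
--         if ord(i) in range(ord('a'),ord('z')+1):
--             lowercase_exists = True
--         if ord(i) in range(ord('A'),ord('Z')+1):
--             uppercase_exists = True
--     return lowercase_exists and uppercase_exists
-- ===== SOURCE B (Python) =====
-- _LOWER = set("abcdefghijklmnopqrstuvwxyz")
-- _UPPER = set("ABCDEFGHIJKLMNOPQRSTUVWXYZ")
--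
-- def check_register(line):
--     s = set(line)
--     return bool(s & _LOWER) and bool(s & _UPPER)
-- ===== Notes on version B (the rewrite author's own statement) =====
-- stated objective: idiomatic
-- what changed: Replaces the flag-setting per-character scan with materializing the distinct characters as a set once and answering via two set intersections with the ASCII letter sets.
import Mathlib
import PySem

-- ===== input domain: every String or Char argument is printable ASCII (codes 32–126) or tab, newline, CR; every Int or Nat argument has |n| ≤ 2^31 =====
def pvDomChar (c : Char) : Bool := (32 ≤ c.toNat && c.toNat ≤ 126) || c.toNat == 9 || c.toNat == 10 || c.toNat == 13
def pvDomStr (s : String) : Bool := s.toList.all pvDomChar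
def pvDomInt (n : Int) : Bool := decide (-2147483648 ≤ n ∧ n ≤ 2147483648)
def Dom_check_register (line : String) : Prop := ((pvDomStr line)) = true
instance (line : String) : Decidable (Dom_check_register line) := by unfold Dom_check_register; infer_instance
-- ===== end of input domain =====

-- B replaces A's flag-setting scan by a set of distinct characters intersected with the ASCII letter sets (idiomatic, same cost).

-- ===== PORT A =====
-- literal port of A's loop: two flags updated over each character
def check_register (line : String) : Bool :=
  let st := line.toList.foldl (fun (p : Bool × Bool) i =>
      (if 97 ≤ i.toNat ∧ i.toNat ≤ 122 then true else p.1,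
       if 65 ≤ i.toNat ∧ i.toNat ≤ 90 then true else p.2))
    (false, false)
  st.1 && st.2

-- ===== PORT B =====
def pvLowerSet : PySem.Set Char := PySem.Set.ofList "abcdefghijklmnopqrstuvwxyz".toList
def pvUpperSet : PySem.Set Char := PySem.Set.ofList "ABCDEFGHIJKLMNOPQRSTUVWXYZ".toList

def check_register_alt (line : String) : Bool :=
  let s := PySem.Set.ofList line.toList
  !(PySem.Set.inter s pvLowerSet).isEmpty && !(PySem.Set.inter s pvUpperSet).isEmpty

-- ===== PRECONDITION & SPEC =====
def Spec_check_register (line : String) (out : Bool) : Prop := out = check_register_alt line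
instance (line : String) (out : Bool) : Decidable (Spec_check_register line out) := by unfold Spec_check_register; infer_instance

-- ===== CLAIM (what is proved, stated in full; the proofs are below) =====
def Claim_equal_check_register : Prop := ∀ (line : String), Dom_check_register line → Spec_check_register line (check_register line)

-- ===== LEMMAS AND PROOFS =====

lemma mem_natRangeList (c : Char) (l : List Char) (ns : List Nat) (lo hi : Nat)
    (hmap : l.map Char.toNat = ns) (hns : ∀ n, n ∈ ns ↔ lo ≤ n ∧ n ≤ hi) :
    (c ∈ l) ↔ (lo ≤ c.toNat ∧ c.toNat ≤ hi) := by
  constructor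
  · intro h
    have : c.toNat ∈ ns := hmap ▸ List.mem_map_of_mem h
    exact (hns _).mp this
  · intro hb
    have hn : c.toNat ∈ l.map Char.toNat := hmap ▸ (hns _).mpr hb
    obtain ⟨d, hd, hdc⟩ := List.mem_map.mp hn
    exact (Char.ext (UInt32.toNat_inj.mp hdc)) ▸ hd

lemma mem_lowerSet (c : Char) : (c ∈ pvLowerSet) ↔ (97 ≤ c.toNat ∧ c.toNat ≤ 122) :=
  mem_natRangeList c _ [97,98,99,100,101,102,103,104,105,106,107,108,109,110,111,112,113,114,115,116,117,118,119,120,121,122] 97 122 (by decide) (by intro n; simp; omega)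

lemma mem_upperSet (c : Char) : (c ∈ pvUpperSet) ↔ (65 ≤ c.toNat ∧ c.toNat ≤ 90) :=
  mem_natRangeList c _ [65,66,67,68,69,70,71,72,73,74,75,76,77,78,79,80,81,82,83,84,85,86,87,88,89,90] 65 90 (by decide) (by intro n; simp; omega)

lemma inter_any (l : List Char) (t : PySem.Set Char) (p : Char → Bool)
    (hp : ∀ c, (c ∈ t) ↔ p c = true) :
    (!(PySem.Set.inter (PySem.Set.ofList l) t).isEmpty) = l.any p := by
  rcases hE : (PySem.Set.inter (PySem.Set.ofList l) t).isEmpty with _ | _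
  · obtain ⟨x, hx⟩ := List.exists_mem_of_ne_nil _ (by simpa [List.isEmpty_iff] using hE)
    have hm := (PySem.Set.mem_inter _ _ _).mp hx
    have : l.any p = true := List.any_eq_true.mpr
      ⟨x, (PySem.Set.mem_ofList _ _).mp hm.1, (hp x).mp hm.2⟩
    simp [this]
  · have : l.any p = false := by
      rw [List.any_eq_false]
      intro x hxl hpx
      have hx : x ∈ PySem.Set.inter (PySem.Set.ofList l) t :=
        (PySem.Set.mem_inter _ _ _).mpr ⟨(PySem.Set.mem_ofList _ _).mpr hxl, (hp x).mpr hpx⟩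
      rw [List.isEmpty_iff] at hE
      simp [hE] at hx
    simp [this]

lemma foldl_flags (l : List Char) (a b : Bool) :
    l.foldl (fun (p : Bool × Bool) i =>
      (if 97 ≤ i.toNat ∧ i.toNat ≤ 122 then true else p.1,
       if 65 ≤ i.toNat ∧ i.toNat ≤ 90 then true else p.2)) (a, b)
    = (a || l.any (fun i => decide (97 ≤ i.toNat ∧ i.toNat ≤ 122)),
       b || l.any (fun i => decide (65 ≤ i.toNat ∧ i.toNat ≤ 90))) := by
  induction l generalizing a b with
  | nil => simp
  | cons x xs ih =>
    simp only [List.foldl_cons, List.any_cons, ih]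
    by_cases h1 : 97 ≤ x.toNat ∧ x.toNat ≤ 122 <;>
      by_cases h2 : 65 ≤ x.toNat ∧ x.toNat ≤ 90 <;>
      simp [h1, h2]

-- ===== VERDICT (by name: the statement is the Claim_ definition above) =====
theorem check_register_spec : Claim_equal_check_register := by
  intro line _
  unfold Spec_check_register check_register check_register_alt
  have h1 := inter_any line.toList pvLowerSet (fun i => decide (97 ≤ i.toNat ∧ i.toNat ≤ 122))
    (fun c => by rw [mem_lowerSet]; simp)
  have h2 := inter_any line.toList pvUpperSet (fun i => decide (65 ≤ i.toNat ∧ i.toNat ≤ 90))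
    (fun c => by rw [mem_upperSet]; simp)
  dsimp only
  rw [foldl_flags, h1, h2]
  simp
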